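-- pv_equiv track=rewrite | github.com/linuswolff/ViewFromTheStreet | Scripts/funda_data_processing_functions.py | map_dutch_month
-- ===== SOURCE A (Python) =====
-- def map_dutch_month(x: str) -> str:
--     """Map the month from Dutch to English."""
--     month_mapping = {
--         "januari": "January",
--         "februari": "February",
--         "maart": "March",
--         "mei": "May",
--         "juni": "June",
--         "juli": "July",
--         "augustus": "August",
--         "oktober": "October",
--     }
--     for k, v in month_mapping.items():
--         if x.find(k) != -1:
--             x = x.replace(k, v)
--     return x
-- ===== SOURCE B (Python) =====
-- def map_dutch_month(x: str) -> str:
--     """Map the month from Dutch to English (single left-to-right scan)."""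
--     months = [
--         ("januari", "January"),
--         ("februari", "February"),
--         ("maart", "March"),
--         ("mei", "May"),
--         ("juni", "June"),
--         ("juli", "July"),
--         ("augustus", "August"),
--         ("oktober", "October"),
--     ]
--     out = []
--     i = 0
--     n = len(x)
--     while i < n:
--         for k, v in months:
--             if x.startswith(k, i):
--                 out.append(v)
--                 i += len(k)
--                 break
--         else:
--             out.append(x[i])
--             i += 1
--     return "".join(out)
-- ===== Notes on version B (the rewrite author's own statement) =====
-- stated objective: alternative
-- what changed: Replaces the eight sequential full-string find+replace passes by a single left-to-right scan that, at each position, looks up the first matching Dutch month in the table, emits its English name and skips it (or copies the character).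
import Mathlib
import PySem

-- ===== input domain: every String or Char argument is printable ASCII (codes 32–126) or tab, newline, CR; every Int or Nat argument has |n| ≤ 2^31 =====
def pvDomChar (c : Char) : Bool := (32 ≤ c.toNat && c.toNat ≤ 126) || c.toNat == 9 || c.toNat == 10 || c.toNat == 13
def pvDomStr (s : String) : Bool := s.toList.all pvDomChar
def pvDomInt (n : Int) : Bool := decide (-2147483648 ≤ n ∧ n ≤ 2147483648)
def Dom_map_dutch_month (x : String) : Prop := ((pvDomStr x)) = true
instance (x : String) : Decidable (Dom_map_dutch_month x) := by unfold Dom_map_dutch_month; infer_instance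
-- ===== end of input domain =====

-- B replaces A's eight sequential full-string find+replace passes by one left-to-right
-- scan emitting the first matching month at each position (objective: alternative).

-- ===== PORT A =====
-- the dict, as an association list in insertion order
def pvMonthsA : List (String × String) :=
  [("januari", "January"), ("februari", "February"), ("maart", "March"), ("mei", "May"),
   ("juni", "June"), ("juli", "July"), ("augustus", "August"), ("oktober", "October")]

def map_dutch_month (x : String) : String :=
  pvMonthsA.foldl
    (fun s kv => if PySem.Str.find s kv.1 ≠ -1 then PySem.Str.replace s kv.1 kv.2 else s) x

-- ===== PORT B =====
-- B's table, at the character level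
def pvMonthsB : List (List Char × List Char) :=
  [("januari".toList, "January".toList), ("februari".toList, "February".toList),
   ("maart".toList, "March".toList), ("mei".toList, "May".toList),
   ("juni".toList, "June".toList), ("juli".toList, "July".toList),
   ("augustus".toList, "August".toList), ("oktober".toList, "October".toList)]

-- Source B's while-loop: at each position, the first table key that starts here is emitted
-- translated and skipped, otherwise the character is copied.  ('max 1' is only a
-- termination guard: every key in the table is nonempty, so it equals kv.1.length.)
def pvScan (P : List (List Char × List Char)) : List Char → List Char
  | [] => []
  | c :: t =>
    match P.find? (fun p => p.1.isPrefixOf (c :: t)) with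
    | some kv => kv.2 ++ pvScan P ((c :: t).drop (max 1 kv.1.length))
    | none => c :: pvScan P t
termination_by s => s.length
decreasing_by
  all_goals simp_all

def map_dutch_month_alt (x : String) : String := String.ofList (pvScan pvMonthsB x.toList)

-- ===== PRECONDITION & SPEC =====
def Spec_map_dutch_month (x : String) (out : String) : Prop := out = map_dutch_month_alt x
instance (x : String) (out : String) : Decidable (Spec_map_dutch_month x out) := by unfold Spec_map_dutch_month; infer_instance

-- ===== CLAIM (what is proved, stated in full; the proofs are below) =====
def Claim_equal_map_dutch_month : Prop := ∀ (x : String), Dom_map_dutch_month x → Spec_map_dutch_month x (map_dutch_month x)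

-- ===== LEMMAS AND PROOFS =====

-- `pvNoOv a b`: no nonempty suffix of `a` is prefix-compatible with `b`
-- (so an occurrence of `b` can never start strictly inside `a` and run past it,
-- nor start inside `a` and end inside it except at its very start).
def pvNoOv (a b : List Char) : Prop := ∀ w ∈ a.tails, w ≠ [] → ¬ w <+: b ∧ ¬ b <+: w

def pvGood (P : List (List Char × List Char)) : Prop :=
  (∀ p ∈ P, p.1 ≠ [] ∧ p.2 ≠ []) ∧
  (∀ p ∈ P, ∀ q ∈ P, p.1 ≠ q.1 → pvNoOv p.1 q.1) ∧
  (P.map Prod.fst).Nodup ∧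
  (∀ p ∈ P, ∀ q ∈ P, pvNoOv p.2 q.1) ∧
  (∀ p ∈ P, ∀ q ∈ P, ∀ c, p.2.head? = some c → c ∉ q.1)

lemma pvNoOv_of_suffix {a a' b : List Char} (h : pvNoOv a b) (hs : a' <:+ a) : pvNoOv a' b := by
  intro w hw hne
  exact h w ((List.mem_tails _ _).mpr (((List.mem_tails _ _).mp hw).trans hs)) hne

-- characterisation of PySem.Chars.replace (no lemmas about it exist in the prelude)
lemma pvGo_nil (old new : List Char) (fuel : Nat) (acc : List Char) :
    PySem.Chars.replace.go old new fuel [] acc = acc.reverse := by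
  cases fuel <;> simp [PySem.Chars.replace.go]

lemma pvGo_succ (old new : List Char) (fuel : Nat) (c : Char) (t acc : List Char) :
    PySem.Chars.replace.go old new (fuel + 1) (c :: t) acc =
      if old.isPrefixOf (c :: t) then
        PySem.Chars.replace.go old new fuel ((c :: t).drop old.length) (new.reverse ++ acc)
      else PySem.Chars.replace.go old new fuel t (c :: acc) := by
  simp [PySem.Chars.replace.go]

lemma pvDropLen (old : List Char) (hold : old ≠ []) (c : Char) (t : List Char) (n : Nat)
    (h : t.length ≤ n) : ((c :: t).drop old.length).length ≤ n := by
  have h1 : 0 < old.length := List.length_pos_of_ne_nil hold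
  rw [List.length_drop, List.length_cons]; omega

lemma pvGo_acc (old new : List Char) (hold : old ≠ []) :
    ∀ fuel l acc, l.length ≤ fuel →
      PySem.Chars.replace.go old new fuel l acc =
        acc.reverse ++ PySem.Chars.replace.go old new fuel l [] := by
  intro fuel
  induction fuel with
  | zero => intro l acc _; simp [PySem.Chars.replace.go]
  | succ n ih =>
    intro l acc hl
    cases l with
    | nil => simp [pvGo_nil]
    | cons c t =>
      rw [pvGo_succ, pvGo_succ]
      simp only [List.length_cons] at hl
      by_cases hp : old.isPrefixOf (c :: t)
      · have hlen : ((c :: t).drop old.length).length ≤ n :=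
          pvDropLen old hold c t n (by omega)
        rw [if_pos hp, if_pos hp, ih _ (new.reverse ++ acc) hlen, ih _ (new.reverse ++ []) hlen]
        simp
      · have hlen : t.length ≤ n := by omega
        rw [if_neg hp, if_neg hp, ih _ (c :: acc) hlen, ih _ (c :: []) hlen]
        simp
  
lemma pvGo_fuel (old new : List Char) (hold : old ≠ []) :
    ∀ f₁ f₂ l, l.length ≤ f₁ → l.length ≤ f₂ →
      PySem.Chars.replace.go old new f₁ l [] = PySem.Chars.replace.go old new f₂ l [] := by
  intro f₁
  induction f₁ with
  | zero =>
    intro f₂ l h1 _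
    have : l = [] := by cases l with | nil => rfl | cons _ _ => simp at h1
    subst this; simp [pvGo_nil]
  | succ n ih =>
    intro f₂ l h1 h2
    cases l with
    | nil => simp [pvGo_nil]
    | cons c t =>
      cases f₂ with
      | zero => simp at h2
      | succ m =>
        simp only [List.length_cons] at h1 h2
        rw [pvGo_succ, pvGo_succ]
        by_cases hp : old.isPrefixOf (c :: t)
        · have h1' : ((c :: t).drop old.length).length ≤ n :=
            pvDropLen old hold c t n (by omega)
          have h2' : ((c :: t).drop old.length).length ≤ m :=
            pvDropLen old hold c t m (by omega)
          rw [if_pos hp, if_pos hp, pvGo_acc old new hold n _ _ h1',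
              pvGo_acc old new hold m _ _ h2', ih _ _ h1' h2']
        · have h1' : t.length ≤ n := by omega
          have h2' : t.length ≤ m := by omega
          rw [if_neg hp, if_neg hp, pvGo_acc old new hold n _ _ h1',
              pvGo_acc old new hold m _ _ h2', ih _ _ h1' h2']

lemma pvReplace_eq_go (s old new : List Char) (hold : old ≠ []) :
    PySem.Chars.replace s old new = PySem.Chars.replace.go old new s.length s [] := by
  simp [PySem.Chars.replace, hold]

lemma pvReplace_nil (old new : List Char) (hold : old ≠ []) :
    PySem.Chars.replace [] old new = [] := by
  rw [pvReplace_eq_go _ _ _ hold]; simp [pvGo_nil]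

lemma pvReplace_cons (old new : List Char) (hold : old ≠ []) (c : Char) (t : List Char) :
    PySem.Chars.replace (c :: t) old new =
      if old.isPrefixOf (c :: t) then
        new ++ PySem.Chars.replace ((c :: t).drop old.length) old new
      else c :: PySem.Chars.replace t old new := by
  rw [pvReplace_eq_go _ _ _ hold]
  simp only [List.length_cons, pvGo_succ]
  by_cases hp : old.isPrefixOf (c :: t)
  · have h1 : 1 ≤ old.length := by
      cases old with | nil => exact absurd rfl hold | cons _ _ => simp
    have hlen : ((c :: t).drop old.length).length ≤ t.length :=
      pvDropLen old hold c t t.length le_rfl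
    rw [if_pos hp, if_pos hp,
        pvGo_acc old new hold t.length _ _ hlen,
        pvGo_fuel old new hold t.length ((c :: t).drop old.length).length _ hlen le_rfl,
        pvReplace_eq_go ((c :: t).drop old.length) _ _ hold]
    simp
  · rw [if_neg hp, if_neg hp,
        pvGo_acc old new hold t.length t [c] le_rfl,
        pvReplace_eq_go t _ _ hold]
    simp

lemma pvReplace_not_infix (old new : List Char) (hold : old ≠ []) :
    ∀ s, ¬ old <:+: s → PySem.Chars.replace s old new = s := by
  intro s
  induction s with
  | nil => intro _; exact pvReplace_nil _ _ hold
  | cons c t ih =>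
    intro h
    rw [pvReplace_cons _ _ hold]
    have hp : ¬ old.isPrefixOf (c :: t) := by
      intro hpre
      exact h ((List.isPrefixOf_iff_prefix.mp hpre).isInfix)
    rw [if_neg hp, ih (fun hi => h (hi.trans (List.suffix_cons c t).isInfix))]

lemma pvReplace_head (k v : List Char) (hk : k ≠ []) (x : List Char) :
    PySem.Chars.replace (k ++ x) k v = v ++ PySem.Chars.replace x k v := by
  cases k with
  | nil => exact absurd rfl hk
  | cons kc kt =>
    rw [List.cons_append, pvReplace_cons _ _ hk]
    have hp : (kc :: kt).isPrefixOf (kc :: (kt ++ x)) := by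
      simp [List.isPrefixOf_iff_prefix]
    rw [if_pos hp]
    congr 1
    rw [← List.cons_append, List.drop_left]

lemma pvReplace_append (old new b : List Char) (hold : old ≠ []) (hb : pvNoOv b old) :
    ∀ x, PySem.Chars.replace (b ++ x) old new = b ++ PySem.Chars.replace x old new := by
  induction b with
  | nil => intro x; simp
  | cons c b' ih =>
    intro x
    rw [List.cons_append, pvReplace_cons _ _ hold]
    have hp : ¬ old.isPrefixOf (c :: (b' ++ x)) := by
      intro hpre
      have hpre' := List.isPrefixOf_iff_prefix.mp hpre
      rw [← List.cons_append] at hpre'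
      have hne : (c :: b') ≠ [] := by simp
      have hno := hb (c :: b') ((List.mem_tails _ _).mpr (List.suffix_refl _)) hne
      rcases List.prefix_or_prefix_of_prefix hpre' (List.prefix_append (c :: b') x) with h | h
      · exact hno.2 h
      · exact hno.1 h
    rw [if_neg hp, List.cons_append]
    congr 1
    exact ih (pvNoOv_of_suffix hb (List.suffix_cons c b')) x

-- equation lemmas for pvScan in usable form
lemma pvScan_nil (P : List (List Char × List Char)) : pvScan P [] = [] := by
  simp [pvScan]

lemma pvScan_cons (P : List (List Char × List Char)) (c : Char) (t : List Char) :
    pvScan P (c :: t) =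
      match P.find? (fun p => p.1.isPrefixOf (c :: t)) with
      | some kv => kv.2 ++ pvScan P ((c :: t).drop (max 1 kv.1.length))
      | none => c :: pvScan P t := by
  rw [pvScan]

lemma pvScan_nil_P : ∀ s, pvScan [] s = s := by
  intro s
  induction s with
  | nil => exact pvScan_nil []
  | cons c t ih => rw [pvScan_cons]; simp [ih]

lemma pvScan_no_match (P : List (List Char × List Char)) (c : Char) (t : List Char)
    (h : ∀ p ∈ P, ¬ p.1 <+: (c :: t)) :
    pvScan P (c :: t) = c :: pvScan P t := by
  rw [pvScan_cons]
  have : P.find? (fun p => p.1.isPrefixOf (c :: t)) = none := by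
    rw [List.find?_eq_none]
    intro p hp
    simp [List.isPrefixOf_iff_prefix]
    exact h p hp
  rw [this]

lemma pvScan_append (P : List (List Char × List Char)) (b : List Char)
    (hb : ∀ p ∈ P, pvNoOv b p.1) :
    ∀ x, pvScan P (b ++ x) = b ++ pvScan P x := by
  induction b with
  | nil => intro x; simp
  | cons c b' ih =>
    intro x
    rw [List.cons_append, pvScan_no_match]
    · rw [List.cons_append]
      congr 1
      exact ih (fun p hp => pvNoOv_of_suffix (hb p hp) (List.suffix_cons c b')) x
    · intro p hp hpre
      rw [← List.cons_append] at hpre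
      have hne : (c :: b') ≠ [] := by simp
      have hno := hb p hp (c :: b') ((List.mem_tails _ _).mpr (List.suffix_refl _)) hne
      rcases List.prefix_or_prefix_of_prefix hpre (List.prefix_append (c :: b') x) with h | h
      · exact hno.2 h
      · exact hno.1 h

lemma pvFind?_match (k v : List Char) (x : List Char) :
    ∀ P : List (List Char × List Char), (∀ p ∈ P, p.1 ≠ []) →
      (∀ p ∈ P, ∀ q ∈ P, p.1 ≠ q.1 → pvNoOv p.1 q.1) →
      (P.map Prod.fst).Nodup →
      (k, v) ∈ P →
      P.find? (fun p => p.1.isPrefixOf (k ++ x)) = some (k, v) := by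
  intro P
  induction P with
  | nil => intro _ _ _ hm; simp at hm
  | cons p0 P' ih =>
    intro h1 h2 hnd hm
    rcases List.mem_cons.mp hm with heq | hm'
    · subst heq
      have : (k, v).1.isPrefixOf (k ++ x) = true := by
        simp [List.isPrefixOf_iff_prefix]
      simp [this]
    · have hkne : p0.1 ≠ k := by
        intro he
        have hk : k ∈ P'.map Prod.fst := List.mem_map.mpr ⟨(k, v), hm', rfl⟩
        exact (List.nodup_cons.mp hnd).1 (he ▸ hk)
      have hno : ¬ p0.1.isPrefixOf (k ++ x) := by
        intro hpre
        have hpre' := List.isPrefixOf_iff_prefix.mp hpre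
        have hne : p0.1 ≠ [] := h1 p0 (List.mem_cons_self)
        have hno' := h2 p0 (List.mem_cons_self) (k, v) (List.mem_cons_of_mem _ hm') hkne
          p0.1 ((List.mem_tails _ _).mpr (List.suffix_refl _)) hne
        rcases List.prefix_or_prefix_of_prefix hpre' (List.prefix_append k x) with h | h
        · exact hno'.1 h
        · exact hno'.2 h
      rw [List.find?_cons]
      simp only [hno]
      exact ih (fun p hp => h1 p (List.mem_cons_of_mem _ hp))
        (fun p hp q hq => h2 p (List.mem_cons_of_mem _ hp) q (List.mem_cons_of_mem _ hq))
        (List.nodup_cons.mp hnd).2 hm'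

lemma pvScan_head_match (P : List (List Char × List Char)) (k v : List Char)
    (h1 : ∀ p ∈ P, p.1 ≠ []) (h2 : ∀ p ∈ P, ∀ q ∈ P, p.1 ≠ q.1 → pvNoOv p.1 q.1)
    (hnd : (P.map Prod.fst).Nodup) (hm : (k, v) ∈ P) (x : List Char) :
    pvScan P (k ++ x) = v ++ pvScan P x := by
  have hk : k ≠ [] := h1 (k, v) hm
  cases k with
  | nil => exact absurd rfl hk
  | cons kc kt =>
    rw [List.cons_append, pvScan_cons, ← List.cons_append,
        pvFind?_match _ _ x _ h1 h2 hnd hm]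
    have hmax : max 1 (kc :: kt).length = (kc :: kt).length := by simp
    simp only [hmax]
    rw [List.drop_left]

-- a key occurrence at the head of a replace-output whose head char avoids the key
-- must come from an occurrence at the head of the input
lemma pvPrefix_replace (old new k' : List Char) (hold : old ≠ []) (hnew : new ≠ [])
    (hc : ∀ a, new.head? = some a → a ∉ k') :
    ∀ s w, w ≠ [] → w <:+ k' → w <+: PySem.Chars.replace s old new → w <+: s := by
  intro s
  induction s with
  | nil =>
    intro w hne hsuf hpre
    rw [pvReplace_nil _ _ hold] at hpre
    exact absurd (List.prefix_nil.mp hpre) hne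
  | cons c t ih =>
    intro w hne hsuf hpre
    rw [pvReplace_cons _ _ hold] at hpre
    by_cases hp : old.isPrefixOf (c :: t)
    · rw [if_pos hp] at hpre
      cases w with
      | nil => exact absurd rfl hne
      | cons wc wt =>
        cases new with
        | nil => exact absurd rfl hnew
        | cons nc nt =>
          rw [List.cons_append] at hpre
          have : wc = nc := (List.cons_prefix_cons.mp hpre).1
          subst this
          have hmem : wc ∈ k' := List.IsSuffix.mem (List.mem_cons_self) hsuf
          exact absurd hmem (hc wc rfl)
    · rw [if_neg hp] at hpre
      cases w with
      | nil => exact absurd rfl hne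
      | cons wc wt =>
        obtain ⟨hwc, hwt⟩ := List.cons_prefix_cons.mp hpre
        subst hwc
        cases wt with
        | nil => simp
        | cons a b =>
          have hsuf' : (a :: b) <:+ k' := (List.suffix_cons wc (a :: b)).trans hsuf
          have := ih (a :: b) (by simp) hsuf' hwt
          exact List.cons_prefix_cons.mpr ⟨rfl, this⟩

lemma pvGood_tail (p : List Char × List Char) (P : List (List Char × List Char))
    (h : pvGood (p :: P)) : pvGood P := by
  obtain ⟨h1, h2, hnd, h3, h4⟩ := h
  exact ⟨fun q hq => h1 q (List.mem_cons_of_mem _ hq),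
         fun q hq r hr => h2 q (List.mem_cons_of_mem _ hq) r (List.mem_cons_of_mem _ hr),
         (List.nodup_cons.mp hnd).2,
         fun q hq r hr => h3 q (List.mem_cons_of_mem _ hq) r (List.mem_cons_of_mem _ hr),
         fun q hq r hr => h4 q (List.mem_cons_of_mem _ hq) r (List.mem_cons_of_mem _ hr)⟩

-- the key step: scanning with (k,v) first equals replacing k by v, then scanning the rest
lemma pvSL (k v : List Char) (P' : List (List Char × List Char))
    (hG : pvGood ((k, v) :: P')) :
    ∀ s, pvScan ((k, v) :: P') s = pvScan P' (PySem.Chars.replace s k v) := by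
  obtain ⟨h1, h2, hnd, h3, h4⟩ := hG
  have hk : k ≠ [] := (h1 (k, v) (List.mem_cons_self)).1
  have hv : v ≠ [] := (h1 (k, v) (List.mem_cons_self)).2
  suffices H : ∀ n s, s.length ≤ n → pvScan ((k, v) :: P') s = pvScan P' (PySem.Chars.replace s k v) by
    intro s; exact H s.length s le_rfl
  intro n
  induction n with
  | zero =>
    intro s hs
    have : s = [] := by cases s with | nil => rfl | cons _ _ => simp at hs
    subst this
    rw [pvScan_nil, pvReplace_nil _ _ hk, pvScan_nil]
  | succ n ih =>
    intro s hs
    cases s with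
    | nil => rw [pvScan_nil, pvReplace_nil _ _ hk, pvScan_nil]
    | cons c t =>
      by_cases hkp : k <+: (c :: t)
      · obtain ⟨r, hr⟩ := hkp
        rw [← hr]
        rw [pvScan_head_match _ k v (fun p hp => (h1 p hp).1) h2 hnd (List.mem_cons_self) r]
        rw [pvReplace_head _ _ hk]
        rw [pvScan_append P' v (fun p hp => h3 (k, v) (List.mem_cons_self) p (List.mem_cons_of_mem _ hp)) _]
        congr 1
        apply ih
        have hk1 : 1 ≤ k.length := List.length_pos_of_ne_nil hk
        have hlen2 : (k ++ r).length = (c :: t).length := by rw [hr]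
        simp only [List.length_append, List.length_cons] at hlen2 hs
        omega
      · by_cases hm : ∃ k' v', (k', v') ∈ P' ∧ k' <+: (c :: t)
        · obtain ⟨k', v', hmem, hk'p⟩ := hm
          obtain ⟨r', hr'⟩ := hk'p
          rw [← hr']
          rw [pvScan_head_match _ k' v' (fun p hp => (h1 p hp).1) h2 hnd
              (List.mem_cons_of_mem _ hmem) r']
          have hkne : k' ≠ k := by
            intro he
            have hk'' : k' ∈ P'.map Prod.fst := List.mem_map.mpr ⟨(k', v'), hmem, rfl⟩
            exact (List.nodup_cons.mp hnd).1 (he ▸ hk'')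
          have hnov : pvNoOv k' k := h2 (k', v') (List.mem_cons_of_mem _ hmem)
            (k, v) (List.mem_cons_self) hkne
          rw [pvReplace_append _ _ _ hk hnov]
          rw [pvScan_head_match P' k' v' (fun p hp => (h1 p (List.mem_cons_of_mem _ hp)).1)
              (fun p hp q hq => h2 p (List.mem_cons_of_mem _ hp) q (List.mem_cons_of_mem _ hq))
              (List.nodup_cons.mp hnd).2 hmem]
          congr 1
          apply ih
          have hk1 : 1 ≤ k'.length :=
            List.length_pos_of_ne_nil (h1 (k', v') (List.mem_cons_of_mem _ hmem)).1
          have hlen2 : (k' ++ r').length = (c :: t).length := by rw [hr']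
          simp only [List.length_append, List.length_cons] at hlen2 hs
          omega
        · have hm' : ∀ k' v', (k', v') ∈ P' → ¬ k' <+: (c :: t) := by
            intro k' v' hmem hpre
            exact hm ⟨k', v', hmem, hpre⟩
          rw [pvScan_no_match]
          · have hrep : PySem.Chars.replace (c :: t) k v = c :: PySem.Chars.replace t k v := by
              rw [pvReplace_cons _ _ hk]
              have hnp : ¬ k.isPrefixOf (c :: t) = true := by
                intro h; exact hkp (List.isPrefixOf_iff_prefix.mp h)
              rw [if_neg hnp]
            rw [hrep]
            rw [pvScan_no_match]
            · congr 1
              apply ih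
              simp at hs; omega
            · intro p hp hpre
              obtain ⟨k', v'⟩ := p
              cases hK : k' with
              | nil => exact absurd hK (h1 (k', v') (List.mem_cons_of_mem _ hp)).1
              | cons kc kt =>
                subst hK
                obtain ⟨hkc, hkt⟩ := List.cons_prefix_cons.mp hpre
                subst hkc
                cases kt with
                | nil => exact hm' [kc] v' hp (by simp)
                | cons a b =>
                  have hsuf : (a :: b) <:+ (kc :: a :: b) := List.suffix_cons kc (a :: b)
                  have := pvPrefix_replace k v (kc :: a :: b) hk hv
                    (fun ch hch => h4 (k, v) (List.mem_cons_self) (kc :: a :: b, v')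
                      (List.mem_cons_of_mem _ hp) ch hch)
                    t (a :: b) (by simp) hsuf hkt
                  exact hm' (kc :: a :: b) v' hp (List.cons_prefix_cons.mpr ⟨rfl, this⟩)
          · intro p hp hpre
            rcases List.mem_cons.mp hp with heq | hp'
            · subst heq; exact hkp hpre
            · exact hm' p.1 p.2 hp' hpre

lemma pvMain : ∀ P : List (List Char × List Char), pvGood P →
    ∀ s, pvScan P s = P.foldl (fun s p => PySem.Chars.replace s p.1 p.2) s := by
  intro P
  induction P with
  | nil => intro _ s; rw [pvScan_nil_P]; rfl
  | cons p P' ih =>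
    intro hG s
    obtain ⟨k, v⟩ := p
    rw [pvSL k v P' hG s, ih (pvGood_tail _ _ hG) _, List.foldl_cons]

set_option maxRecDepth 100000 in
lemma pvGoodM1 : ∀ p ∈ pvMonthsB, p.1 ≠ [] ∧ p.2 ≠ [] := by decide

def pvNoOvB (a b : List Char) : Bool :=
  a.tails.all (fun w => w.isEmpty || (!(w.isPrefixOf b) && !(b.isPrefixOf w)))

lemma pvNoOv_of_B (a b : List Char) (h : pvNoOvB a b = true) : pvNoOv a b := by
  intro w hw hne
  have h' := (List.all_eq_true.mp h) w hw
  simp only [Bool.or_eq_true, Bool.and_eq_true, Bool.not_eq_true', List.isEmpty_iff] at h'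
  rcases h' with h' | ⟨hp, hq⟩
  · exact absurd h' hne
  · constructor
    · intro hc
      rw [List.isPrefixOf_iff_prefix.mpr hc] at hp
      exact Bool.true_eq_false.mp hp
    · intro hc
      rw [List.isPrefixOf_iff_prefix.mpr hc] at hq
      exact Bool.true_eq_false.mp hq

set_option maxRecDepth 100000 in
lemma pvGoodB2 :
    pvMonthsB.all (fun p => pvMonthsB.all (fun q => p.1 == q.1 || pvNoOvB p.1 q.1)) = true := by
  decide

lemma pvGoodM2 : ∀ p ∈ pvMonthsB, ∀ q ∈ pvMonthsB, p.1 ≠ q.1 → pvNoOv p.1 q.1 := by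
  intro p hp q hq hne
  have h := (List.all_eq_true.mp ((List.all_eq_true.mp pvGoodB2) p hp)) q hq
  simp only [Bool.or_eq_true, beq_iff_eq] at h
  rcases h with h | h
  · exact absurd h hne
  · exact pvNoOv_of_B _ _ h

set_option maxRecDepth 100000 in
lemma pvGoodM3 : (pvMonthsB.map Prod.fst).Nodup := by decide

set_option maxRecDepth 100000 in
lemma pvGoodB4 :
    pvMonthsB.all (fun p => pvMonthsB.all (fun q => pvNoOvB p.2 q.1)) = true := by
  decide

lemma pvGoodM4 : ∀ p ∈ pvMonthsB, ∀ q ∈ pvMonthsB, pvNoOv p.2 q.1 := by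
  intro p hp q hq
  exact pvNoOv_of_B _ _ ((List.all_eq_true.mp ((List.all_eq_true.mp pvGoodB4) p hp)) q hq)

set_option maxRecDepth 100000 in
lemma pvGoodB5 :
    pvMonthsB.all (fun p => pvMonthsB.all
      (fun q => p.2.head?.all (fun c => !(q.1.contains c)))) = true := by
  decide

lemma pvGoodM5 : ∀ p ∈ pvMonthsB, ∀ q ∈ pvMonthsB, ∀ c, p.2.head? = some c → c ∉ q.1 := by
  intro p hp q hq c hc
  have h := (List.all_eq_true.mp ((List.all_eq_true.mp pvGoodB5) p hp)) q hq
  rw [hc] at h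
  simpa using h

lemma pvGood_months : pvGood pvMonthsB :=
  ⟨pvGoodM1, pvGoodM2, pvGoodM3, pvGoodM4, pvGoodM5⟩

-- bridge from A's String-level guarded replace to the char level
lemma pvStep_str (s k v : String) (hk : k.toList ≠ []) :
    (if PySem.Str.find s k ≠ -1 then PySem.Str.replace s k v else s) =
      String.ofList (PySem.Chars.replace s.toList k.toList v.toList) := by
  by_cases h : PySem.Str.find s k = -1
  · have hni : ¬ k.toList <:+: s.toList := (PySem.Str.find_eq_neg_one_iff s k).mp h
    rw [if_neg (fun hc => hc h), pvReplace_not_infix _ _ hk _ hni, String.ofList_toList]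
  · rw [if_pos h]
    rfl

lemma pvFoldl_str (L : List (String × String)) (hL : ∀ p ∈ L, p.1.toList ≠ []) :
    ∀ s : String,
      L.foldl (fun s kv => if PySem.Str.find s kv.1 ≠ -1 then PySem.Str.replace s kv.1 kv.2 else s) s =
        String.ofList ((L.map (fun p => (p.1.toList, p.2.toList))).foldl
          (fun cs p => PySem.Chars.replace cs p.1 p.2) s.toList) := by
  induction L with
  | nil => intro s; simp [String.ofList_toList]
  | cons p L' ih =>
    intro s
    rw [List.foldl_cons, pvStep_str s p.1 p.2 (hL p (List.mem_cons_self)),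
        ih (fun q hq => hL q (List.mem_cons_of_mem _ hq))]
    simp [String.toList_ofList]

lemma pvMapsEq : pvMonthsA.map (fun p => (p.1.toList, p.2.toList)) = pvMonthsB := by decide

-- ===== VERDICT (by name: the statement is the Claim_ definition above) =====
theorem map_dutch_month_spec : Claim_equal_map_dutch_month := by
  intro x _
  unfold Spec_map_dutch_month map_dutch_month map_dutch_month_alt
  rw [pvFoldl_str pvMonthsA (by decide) x, pvMapsEq,
      ← pvMain pvMonthsB pvGood_months x.toList]
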